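-- pv_equiv track=rewrite | github.com/pangeran-bottor/coding_challenges | codechef/april_2020_div2/covidlq.py | solve
-- ===== SOURCE A (Python) =====
-- def solve(N, A):
--     latest = None
--     for i in range(N):
--         if A[i] == 1:
--             if latest is None:
--                 latest = i
--             else:
--                 if i - latest < 6:
--                     return "NO"
--                 latest = i
--
--     return "YES"
-- ===== SOURCE B (Python) =====
-- def solve(N, A):
--     # Sliding-window check: answer is "NO" iff some infected index has another
--     # infected index within the next 5 positions (no positions list, no rolling state).
--     if any(A[i] == 1 and A[j] == 1
--            for i in range(N)
--            for j in range(i + 1, min(i + 6, N))):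
--         return "NO"
--     return "YES"
-- ===== Notes on version B (the rewrite author's own statement) =====
-- stated objective: alternative
-- what changed: Replaces the single-pass rolling 'latest' state machine by a stateless sliding-window existence check: for every index i, look only at the bounded window of the next five indices for another infected cell; correct because two infected cells less than 6 apart exist iff some infected cell has another within its 5-wide window.
-- outside the precondition, e.g. on solve(3, [1, 1]): A returns 'NO', B returns 'NO'
import Mathlib
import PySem

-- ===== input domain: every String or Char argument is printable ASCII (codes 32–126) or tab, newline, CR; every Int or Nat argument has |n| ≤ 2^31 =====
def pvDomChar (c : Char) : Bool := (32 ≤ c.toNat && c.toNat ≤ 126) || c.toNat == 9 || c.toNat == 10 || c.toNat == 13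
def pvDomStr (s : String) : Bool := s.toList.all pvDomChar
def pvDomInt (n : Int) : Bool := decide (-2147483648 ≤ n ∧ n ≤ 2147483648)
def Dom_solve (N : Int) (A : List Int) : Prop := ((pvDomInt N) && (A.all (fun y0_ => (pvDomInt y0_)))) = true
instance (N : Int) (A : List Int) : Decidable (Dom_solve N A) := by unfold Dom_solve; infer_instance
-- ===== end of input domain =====

-- B replaces A's rolling 'latest' state machine by a stateless sliding-window
-- existence check over the next five positions of each index (objective: alternative).


-- ===== PORT A =====
-- the loop over range(N) with the rolling 'latest' and early return "NO";
-- A[i] out of range (pyGet? = none, Python IndexError) is excluded by Pre_solve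
def solveGo (A : List Int) : List Int → Option Int → String
  | [], _ => "YES"
  | i :: rest, latest =>
    if (PySem.List.pyGet? A i).getD 0 = 1 then
      match latest with
      | none => solveGo A rest (some i)
      | some l => if i - l < 6 then "NO" else solveGo A rest (some i)
    else solveGo A rest latest

def solve (N : Int) (A : List Int) : String :=
  solveGo A (PySem.List.pyRange 0 N 1) none

-- ===== PORT B =====
-- any(A[i]==1 and A[j]==1 for i in range(N) for j in range(i+1, min(i+6, N)))
def solve_alt (N : Int) (A : List Int) : String :=
  if (PySem.List.pyRange 0 N 1).any (fun i =>
       (PySem.List.pyRange (i + 1) (min (i + 6) N) 1).any (fun j =>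
         (PySem.List.pyGet? A i).getD 0 == 1 && (PySem.List.pyGet? A j).getD 0 == 1))
  then "NO" else "YES"

-- ===== PRECONDITION & SPEC =====
-- Pre_ excludes N > len(A): there Python A raises IndexError unless an early "NO"
-- fires first (then B returns "NO" as well), and B can also return "YES" without
-- ever indexing out of range.
def Pre_solve (N : Int) (A : List Int) : Prop := N ≤ (A.length : Int)
instance (N : Int) (A : List Int) : Decidable (Pre_solve N A) := by unfold Pre_solve; infer_instance
def pvWitness_solve : Int × List Int := (2, [1, 0])

def Spec_solve (N : Int) (A : List Int) (out : String) : Prop := out = solve_alt N A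
instance (N : Int) (A : List Int) (out : String) : Decidable (Spec_solve N A out) := by unfold Spec_solve; infer_instance

-- ===== CLAIM (what is proved, stated in full; the proofs are below) =====
def Claim_equal_solve : Prop := ∀ (N : Int) (A : List Int), Dom_solve N A → Pre_solve N A → Spec_solve N A (solve N A)

-- ===== LEMMAS AND PROOFS =====

-- adjacent-pair check on the list of infected positions (characterises A's loop)
def pvChk (pos : List Int) : Bool := (pos.zip pos.tail).any (fun p => p.2 - p.1 < 6)

theorem pvChk_cons (a : Int) (pos : List Int) :
    pvChk (a :: pos) = (match pos with | [] => false | b :: _ => decide (b - a < 6) || pvChk pos) := by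
  cases pos <;> simp [pvChk]

theorem solveGo_some (A : List Int) (idxs : List Int) (l : Int) :
    solveGo A idxs (some l) =
      (if pvChk (l :: idxs.filter (fun i => (PySem.List.pyGet? A i).getD 0 == 1)) then "NO" else "YES") := by
  induction idxs generalizing l with
  | nil => simp [solveGo, pvChk]
  | cons i rest ih =>
    by_cases h : (PySem.List.pyGet? A i).getD 0 = 1
    · simp only [solveGo, h, List.filter_cons, beq_iff_eq, if_true]
      rw [pvChk_cons]
      by_cases h6 : i - l < 6
      · simp [h6]
      · simp [h6, ih i]
    · simp [solveGo, h, ih l]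

theorem solveGo_none (A : List Int) (idxs : List Int) :
    solveGo A idxs none =
      (if pvChk (idxs.filter (fun i => (PySem.List.pyGet? A i).getD 0 == 1)) then "NO" else "YES") := by
  induction idxs with
  | nil => simp [solveGo, pvChk]
  | cons i rest ih =>
    by_cases h : (PySem.List.pyGet? A i).getD 0 = 1
    · simp [solveGo, h, solveGo_some]
    · simp [solveGo, h, ih]

-- on a strictly increasing list, an adjacent pair closer than 6 exists
-- iff ANY pair closer than 6 exists
theorem pvChk_iff_pair (pos : List Int) (hs : pos.Pairwise (· < ·)) :
    pvChk pos = true ↔ ∃ i ∈ pos, ∃ j ∈ pos, i < j ∧ j - i < 6 := by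
  induction pos with
  | nil => simp [pvChk]
  | cons a rest ih =>
    rcases List.pairwise_cons.mp hs with ⟨ha, hrest⟩
    cases rest with
    | nil => simp [pvChk]
    | cons b rest2 =>
      rw [pvChk_cons]
      have hb : a < b := ha b (by simp)
      have hbmin : ∀ j ∈ b :: rest2, b ≤ j := by
        intro j hj
        rcases List.mem_cons.mp hj with h | h
        · omega
        · exact le_of_lt ((List.pairwise_cons.mp hrest).1 j h)
      constructor
      · intro h
        rcases Bool.or_eq_true_iff.mp h with h | h
        · exact ⟨a, by simp, b, by simp, hb, by simpa using h⟩
        · rcases (ih hrest).mp h with ⟨i, hi, j, hj, hij, hd⟩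
          exact ⟨i, by simp [hi], j, by simp [hj], hij, hd⟩
      · rintro ⟨i, hi, j, hj, hij, hd⟩
        have hja : j ≠ a := by
          intro hja
          have : a < i := by
            rcases List.mem_cons.mp hi with h | h
            · omega
            · exact ha i h
          omega
        have hjrest : j ∈ b :: rest2 := by
          rcases List.mem_cons.mp hj with h | h
          · exact absurd h hja
          · exact h
        rcases List.mem_cons.mp hi with h | h
        · subst h
          have := hbmin j hjrest
          apply Bool.or_eq_true_iff.mpr; left
          simp; omega
        · apply Bool.or_eq_true_iff.mpr; right
          exact (ih hrest).mpr ⟨i, h, j, hjrest, hij, hd⟩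

-- B's nested window scan decides the same pair-existence property
theorem window_iff_pair (N : Int) (A : List Int) :
    ((PySem.List.pyRange 0 N 1).any (fun i =>
       (PySem.List.pyRange (i + 1) (min (i + 6) N) 1).any (fun j =>
         (PySem.List.pyGet? A i).getD 0 == 1 && (PySem.List.pyGet? A j).getD 0 == 1)) = true)
    ↔ (∃ i ∈ (PySem.List.pyRange 0 N 1).filter (fun i => (PySem.List.pyGet? A i).getD 0 == 1),
        ∃ j ∈ (PySem.List.pyRange 0 N 1).filter (fun i => (PySem.List.pyGet? A i).getD 0 == 1),
        i < j ∧ j - i < 6) := by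
  simp only [List.any_eq_true, List.mem_filter, PySem.List.mem_pyRange_one, Bool.and_eq_true]
  constructor
  · rintro ⟨i, ⟨hi0, hiN⟩, j, ⟨hj1, hj2⟩, hAi, hAj⟩
    exact ⟨i, ⟨⟨hi0, hiN⟩, hAi⟩, j, ⟨⟨by omega, by omega⟩, hAj⟩, by omega, by omega⟩
  · rintro ⟨i, ⟨⟨hi0, hiN⟩, hAi⟩, j, ⟨⟨hj0, hjN⟩, hAj⟩, hij, hd⟩
    exact ⟨i, ⟨hi0, hiN⟩, j, ⟨by omega, by omega⟩, hAi, hAj⟩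

-- ===== VERDICT (by name: the statement is the Claim_ definition above) =====
theorem solve_spec : Claim_equal_solve := by
  intro N A _ _
  unfold Spec_solve solve solve_alt
  rw [solveGo_none]
  have hpair : pvChk ((PySem.List.pyRange 0 N 1).filter (fun i => (PySem.List.pyGet? A i).getD 0 == 1))
      = ((PySem.List.pyRange 0 N 1).any (fun i =>
          (PySem.List.pyRange (i + 1) (min (i + 6) N) 1).any (fun j =>
            (PySem.List.pyGet? A i).getD 0 == 1 && (PySem.List.pyGet? A j).getD 0 == 1))) := by
    have hs : ((PySem.List.pyRange 0 N 1).filter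
        (fun i => (PySem.List.pyGet? A i).getD 0 == 1)).Pairwise (· < ·) :=
      (PySem.List.pairwise_lt_pyRange_one 0 N).filter _
    rw [Bool.eq_iff_iff]
    exact (pvChk_iff_pair _ hs).trans (window_iff_pair N A).symm
  rw [hpair]
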